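-- pv_equiv track=rewrite | github.com/misttech/mist-os | build/rbe/cl_utils.py | filter_out_option_with_arg
-- ===== SOURCE A (Python) =====
-- from typing import (
--     IO,
--     Any,
--     Callable,
--     Dict,
--     FrozenSet,
--     Generator,
--     Iterable,
--     Iterator,
--     List,
--     Mapping,
--     Optional,
--     Sequence,
--     TextIO,
--     Tuple,
-- )
--
-- def filter_out_option_with_arg(
--     args: Iterable[str], prefix_flag: str
-- ) -> Iterable[str]:
--     """Remove option and arguments that start with a given prefix.
--
--     Example (with prefix_flag="--foo"):
--       removes "--foo=bar" and ("--foo" "bar") from the token sequence.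
--       This also removes "--foo" at the end of the sequence.
--
--     Args:
--       args: command tokens
--       prefix_flag: the flag that should be filtered out (along with its argument).
--
--     Yields:
--       a filtered command
--     """
--     fused_prefix_flag = prefix_flag + "="
--     delete_optarg = False
--     for arg in args:
--         if delete_optarg:
--             delete_optarg = False
--             continue
--
--         if arg == prefix_flag:
--             delete_optarg = True
--             continue
--
--         if arg.startswith(fused_prefix_flag):
--             continue
--
--         yield arg
-- ===== SOURCE B (Python) =====
-- def filter_out_option_with_arg(args, prefix_flag):
--     """Two staged passes: first mark the set of indices to drop (index jumps of 2
--     over flag+argument pairs), then yield the unmarked tokens.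
--     Note: materializes args into a list; return-value equivalent to the one-pass
--     generator (lazy/side-effect behaviour on one-shot iterables differs)."""
--     toks = list(args)
--     fused = prefix_flag + "="
--     dropped = set()
--     i = 0
--     while i < len(toks):
--         if toks[i] == prefix_flag:
--             dropped.add(i)
--             dropped.add(i + 1)
--             i += 2
--         elif toks[i].startswith(fused):
--             dropped.add(i)
--             i += 1
--         else:
--             i += 1
--     for j, tok in enumerate(toks):
--         if j not in dropped:
--             yield tok
-- ===== Notes on version B (the rewrite author's own statement) =====
-- stated objective: alternative
-- what changed: Replaces A's single streaming pass with a carried boolean by two staged passes: an index-jumping first pass (i += 2 over flag/argument pairs) that records a set of dropped indices, then a second pass yielding the tokens whose index is not in that set.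
import Mathlib
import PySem

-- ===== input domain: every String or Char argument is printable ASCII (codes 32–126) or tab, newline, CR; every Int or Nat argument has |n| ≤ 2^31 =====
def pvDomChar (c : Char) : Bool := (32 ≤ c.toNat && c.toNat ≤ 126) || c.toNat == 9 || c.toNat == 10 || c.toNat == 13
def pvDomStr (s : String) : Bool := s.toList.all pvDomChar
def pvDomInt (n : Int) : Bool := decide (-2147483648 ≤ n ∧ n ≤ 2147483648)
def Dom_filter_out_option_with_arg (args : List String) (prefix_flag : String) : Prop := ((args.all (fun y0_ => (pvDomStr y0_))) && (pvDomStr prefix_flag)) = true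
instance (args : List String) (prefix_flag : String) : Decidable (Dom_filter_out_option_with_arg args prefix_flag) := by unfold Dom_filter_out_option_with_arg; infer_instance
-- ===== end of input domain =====

-- B replaces A's one-pass boolean-state filter by two staged passes (mark dropped indices, then filter by index);
-- equivalence is about the RETURN value: B materializes the iterable, so laziness on one-shot iterables differs.

-- ===== PORT A =====
-- one loop step of A: state = (delete_optarg, yielded-so-far)
def pvStepA (prefix_flag : String) (st : Bool × List String) (arg : String) : Bool × List String :=
  if st.1 then (false, st.2)
  else if arg == prefix_flag then (true, st.2)
  else if PySem.Str.startswith arg (prefix_flag ++ "=") then st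
  else (st.1, st.2 ++ [arg])

def filter_out_option_with_arg (args : List String) (prefix_flag : String) : List String :=
  (args.foldl (pvStepA prefix_flag) (false, [])).2

-- ===== PORT B =====
-- first pass: the while-loop marking dropped indices (i jumps by 2 over a flag and its argument)
def pvMarkB (toks : List String) (pf fused : String) (i : Nat) (s : PySem.Set Int) : PySem.Set Int :=
  if h : i < toks.length then
    if toks[i] == pf then
      pvMarkB toks pf fused (i + 2) ((s.add (i : Int)).add ((i : Int) + 1))
    else if PySem.Str.startswith toks[i] fused then
      pvMarkB toks pf fused (i + 1) (s.add (i : Int))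
    else
      pvMarkB toks pf fused (i + 1) s
  else s
termination_by toks.length - i

def filter_out_option_with_arg_alt (args : List String) (prefix_flag : String) : List String :=
  let dropped := pvMarkB args prefix_flag (prefix_flag ++ "=") 0 PySem.Set.empty
  ((PySem.List.enumerate args 0).filter (fun p => !(PySem.Set.contains dropped p.1))).map (·.2)

-- ===== PRECONDITION & SPEC =====
def Spec_filter_out_option_with_arg (args : List String) (prefix_flag : String) (out : List String) : Prop := out = filter_out_option_with_arg_alt args prefix_flag
instance (args : List String) (prefix_flag : String) (out : List String) : Decidable (Spec_filter_out_option_with_arg args prefix_flag out) := by unfold Spec_filter_out_option_with_arg; infer_instance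

-- ===== CLAIM (what is proved, stated in full; the proofs are below) =====
def Claim_equal_filter_out_option_with_arg : Prop := ∀ (args : List String) (prefix_flag : String), Dom_filter_out_option_with_arg args prefix_flag → Spec_filter_out_option_with_arg args prefix_flag (filter_out_option_with_arg args prefix_flag)

-- ===== LEMMAS AND PROOFS =====

-- the common reference recursion both ports are proved equal to
def pvGo (pf : String) : List String → List String
  | [] => []
  | arg :: rest =>
    if arg == pf then
      match rest with
      | [] => []
      | _ :: t => pvGo pf t
    else if PySem.Str.startswith arg (pf ++ "=") then pvGo pf rest
    else arg :: pvGo pf rest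

theorem pvFoldA_eq (pf : String) :
    ∀ (args acc : List String),
      (args.foldl (pvStepA pf) (false, acc)).2 = acc ++ pvGo pf args
  | [], acc => by simp [pvGo]
  | arg :: rest, acc => by
    by_cases h : arg == pf
    · match rest with
      | [] => simp [pvGo, pvStepA, h]
      | b :: t =>
        have := pvFoldA_eq pf t acc
        simp [pvGo, pvStepA, h, List.foldl_cons] at this ⊢
        exact this
    · by_cases h2 : PySem.Str.startswith arg (pf ++ "=")
      · have h2' := h2
        simp only [PySem.Str.startswith_eq, String.toList_append,
          show "=".toList = [Char.ofNat 61] from rfl] at h2'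
        have hg : pvGo pf (arg :: rest) = pvGo pf rest := by
          rw [pvGo.eq_def]
          simp [h, String.toList_append, show "=".toList = [Char.ofNat 61] from rfl, h2']
        have := pvFoldA_eq pf rest acc
        simp [pvStepA, h, h2', List.foldl_cons, hg] at this ⊢
        exact this
      · have h2' := h2
        simp only [PySem.Str.startswith_eq, String.toList_append,
          show "=".toList = [Char.ofNat 61] from rfl] at h2'
        have hg : pvGo pf (arg :: rest) = arg :: pvGo pf rest := by
          rw [pvGo.eq_def]
          simp [h, String.toList_append, show "=".toList = [Char.ofNat 61] from rfl, h2']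
        have := pvFoldA_eq pf rest (acc ++ [arg])
        simp [pvStepA, h, h2', List.foldl_cons, hg]
        simpa using this

theorem pvMark_mem_mono (toks : List String) (pf fused : String) (i : Nat)
    (s : PySem.Set Int) (j : Int) (hj : j ∈ s) : j ∈ pvMarkB toks pf fused i s := by
  rw [pvMarkB.eq_def]
  split_ifs with h h1 h2
  · exact pvMark_mem_mono toks pf fused (i + 2) _ j
      (by simp [PySem.Set.mem_add]; left; left; exact hj)
  · exact pvMark_mem_mono toks pf fused (i + 1) _ j
      (by simp [PySem.Set.mem_add]; left; exact hj)
  · exact pvMark_mem_mono toks pf fused (i + 1) _ j hj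
  · exact hj
termination_by toks.length - i

theorem pvMark_mem_lt (toks : List String) (pf fused : String) (i : Nat)
    (s : PySem.Set Int) (j : Int) (hj : j < (i : Int)) :
    j ∈ pvMarkB toks pf fused i s ↔ j ∈ s := by
  rw [pvMarkB.eq_def]
  split_ifs with h h1 h2
  · rw [pvMark_mem_lt toks pf fused (i + 2) _ j (by push_cast; omega)]
    simp [PySem.Set.mem_add]
    constructor
    · rintro ((hs | rfl) | rfl) <;> first | exact hs | omega
    · intro hs; left; left; exact hs
  · rw [pvMark_mem_lt toks pf fused (i + 1) _ j (by push_cast; omega)]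
    simp [PySem.Set.mem_add]
    rintro rfl
    exact absurd hj (lt_irrefl _)
  · exact pvMark_mem_lt toks pf fused (i + 1) s j (by push_cast; omega)
  · exact Iff.rfl
termination_by toks.length - i

theorem pvB_main (toks : List String) (pf : String) (i : Nat) (s : PySem.Set Int)
    (hs : ∀ j : Int, (i : Int) ≤ j → j ∉ s) :
    ((PySem.List.enumerate (toks.drop i) (i : Int)).filter
        (fun p => !(PySem.Set.contains (pvMarkB toks pf (pf ++ "=") i s) p.1))).map (·.2)
      = pvGo pf (toks.drop i) := by
  by_cases h : i < toks.length
  · have hd : toks.drop i = toks[i] :: toks.drop (i + 1) := List.drop_eq_getElem_cons h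
    rw [hd, PySem.List.enumerate_cons]
    by_cases hb : (toks[i] == pf) = true
    · have hM : pvMarkB toks pf (pf ++ "=") i s
          = pvMarkB toks pf (pf ++ "=") (i + 2) ((s.add (i : Int)).add ((i : Int) + 1)) := by
        rw [pvMarkB.eq_def]; simp [h, hb]
      have hmem : (i : Int) ∈ pvMarkB toks pf (pf ++ "=") i s := by
        rw [hM]; exact pvMark_mem_mono toks pf _ _ _ _ (by simp [PySem.Set.mem_add])
      by_cases h2 : i + 1 < toks.length
      · have hd2 : toks.drop (i + 1) = toks[i + 1] :: toks.drop (i + 2) :=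
          List.drop_eq_getElem_cons h2
        have hmem2 : (i : Int) + 1 ∈ pvMarkB toks pf (pf ++ "=") i s := by
          rw [hM]; exact pvMark_mem_mono toks pf _ _ _ _ (by simp [PySem.Set.mem_add])
        rw [hd2, PySem.List.enumerate_cons,
          List.filter_cons_of_neg (by simp [hmem]), List.filter_cons_of_neg (by simp [hmem2])]
        have hrec := pvB_main toks pf (i + 2) ((s.add (i : Int)).add ((i : Int) + 1))
          (by intro j hj; simp only [PySem.Set.mem_add]
              push_cast at hj
              push Not
              refine ⟨⟨hs j (by omega), by omega⟩, by omega⟩)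
        have hcast : (i : Int) + 1 + 1 = ((i + 2 : Nat) : Int) := by push_cast; omega
        have hgo : pvGo pf (toks[i] :: toks[i + 1] :: toks.drop (i + 2)) = pvGo pf (toks.drop (i + 2)) := by
          rw [pvGo.eq_def]; simp [hb]
        rw [hM, hcast, hrec, hgo]
      · have hd2 : toks.drop (i + 1) = [] := List.drop_eq_nil_of_le (by omega)
        have hgo : pvGo pf [toks[i]] = [] := by
          rw [pvGo.eq_def]; simp [hb]
        rw [hd2, List.filter_cons_of_neg (by simp [hmem]), hgo]
        simp [PySem.List.enumerate_nil]
    · by_cases hsw : PySem.Str.startswith toks[i] (pf ++ "=") = true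
      · have hsw' : PySem.Chars.startswith toks[i].toList (pf.toList ++ ['=']) = true := by
          simpa using hsw
        have hM : pvMarkB toks pf (pf ++ "=") i s
            = pvMarkB toks pf (pf ++ "=") (i + 1) (s.add (i : Int)) := by
          rw [pvMarkB.eq_def]; simp [h, hb, hsw']
        have hmem : (i : Int) ∈ pvMarkB toks pf (pf ++ "=") i s := by
          rw [hM]; exact pvMark_mem_mono toks pf _ _ _ _ (by simp [PySem.Set.mem_add])
        rw [List.filter_cons_of_neg (by simp [hmem])]
        have hrec := pvB_main toks pf (i + 1) (s.add (i : Int))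
          (by intro j hj; simp only [PySem.Set.mem_add]
              push_cast at hj
              push Not
              exact ⟨hs j (by omega), by omega⟩)
        have hcast : (i : Int) + 1 = ((i + 1 : Nat) : Int) := by push_cast; ring
        have hgo : pvGo pf (toks[i] :: toks.drop (i + 1)) = pvGo pf (toks.drop (i + 1)) := by
          rw [pvGo.eq_def]; simp [hb, hsw']
        rw [hM, hcast, hrec, hgo]
      · have hsw' : PySem.Chars.startswith toks[i].toList (pf.toList ++ ['=']) = false := by
          rw [Bool.eq_false_iff]; intro hc; exact hsw (by simpa using hc)
        have hM : pvMarkB toks pf (pf ++ "=") i s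
            = pvMarkB toks pf (pf ++ "=") (i + 1) s := by
          rw [pvMarkB.eq_def]; simp [h, hb, hsw']
        have hnot : (i : Int) ∉ pvMarkB toks pf (pf ++ "=") i s := by
          rw [hM]
          intro hc
          exact hs (i : Int) le_rfl
            ((pvMark_mem_lt toks pf (pf ++ "=") (i + 1) s (i : Int) (by push_cast; omega)).mp hc)
        rw [List.filter_cons_of_pos (by simp [hnot])]
        have hrec := pvB_main toks pf (i + 1) s
          (by intro j hj; push_cast at hj; exact hs j (by omega))
        have hcast : (i : Int) + 1 = ((i + 1 : Nat) : Int) := by push_cast; ring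
        have hgo : pvGo pf (toks[i] :: toks.drop (i + 1)) = toks[i] :: pvGo pf (toks.drop (i + 1)) := by
          rw [pvGo.eq_def]; simp [hb, hsw']
        rw [List.map_cons, hM, hcast, hrec, hgo]
  · have hd : toks.drop i = [] := List.drop_eq_nil_of_le (by omega)
    rw [hd]
    simp [PySem.List.enumerate_nil, pvGo]
termination_by toks.length - i

-- ===== VERDICT (by name: the statement is the Claim_ definition above) =====
theorem filter_out_option_with_arg_spec : Claim_equal_filter_out_option_with_arg := by
  intro args pf _
  unfold Spec_filter_out_option_with_arg filter_out_option_with_arg filter_out_option_with_arg_alt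
  have hB := pvB_main args pf 0 PySem.Set.empty (by intro j _ hj; cases hj)
  simp only [List.drop_zero, Int.natCast_zero] at hB
  rw [hB]
  simpa using pvFoldA_eq pf args []
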